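-- pv_equiv track=rewrite | github.com/CoenHordijk/SAP-BO-Document-API-analyzer | APIDeps.py | getShortestVarDep
-- ===== SOURCE A (Python) =====
-- def getShortestVarDep(VarDeps):
-- # Gets shortest path from var to report
-- # When no paths lead to the report, get overall shortest path
--
--     minDepth = 100
--     minDepthRep = 100
--
--     minID = -1
--     minVarDep = ['', '', '', 0]
--     minVarDepRep =  ['', '', '', 0]
--
--     for i, vardep in enumerate(VarDeps):
--
--         pathlength = vardep[3]
--
--         if (vardep[2].find('report: ') >=0  or vardep[2].find('document')) >= 0:
--             if pathlength < minDepthRep: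
--                 minDepthRep = pathlength
--                 minVarDepRep = vardep
--         else:
--             if pathlength < minDepth:
--                 minDepth = pathlength
--                 minVarDep = vardep
--
--     if minVarDepRep[0] != '':
--         minVarDep = minVarDepRep
--
--     return minVarDep
-- ===== SOURCE B (Python) =====
-- def getShortestVarDep(VarDeps):
--     # Sort the eligible deps (depth < 100) by depth with a stable sort, then the
--     # answer per group is simply the FIRST matching element of the sorted list.
--     ordered = sorted([v for v in VarDeps if v[3] < 100], key=lambda v: v[3])
--     isrep = lambda v: 'report: ' in v[2] or 'document' in v[2]
--     rep = next((v for v in ordered if isrep(v)), None)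
--     if rep is not None and rep[0] != '':
--         return rep
--     gen = next((v for v in ordered if not isrep(v)), None)
--     return gen if gen is not None else ['', '', '', 0]
-- ===== Notes on version B (the rewrite author's own statement) =====
-- stated objective: alternative
-- what changed: A's single stateful loop carrying two running depth thresholds and two best-so-far accumulators is replaced by sort-then-scan: stably sort the deps with depth < 100 by depth, then each group's answer is just the FIRST element of the sorted list that (does not) match the report test.
import Mathlib
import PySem

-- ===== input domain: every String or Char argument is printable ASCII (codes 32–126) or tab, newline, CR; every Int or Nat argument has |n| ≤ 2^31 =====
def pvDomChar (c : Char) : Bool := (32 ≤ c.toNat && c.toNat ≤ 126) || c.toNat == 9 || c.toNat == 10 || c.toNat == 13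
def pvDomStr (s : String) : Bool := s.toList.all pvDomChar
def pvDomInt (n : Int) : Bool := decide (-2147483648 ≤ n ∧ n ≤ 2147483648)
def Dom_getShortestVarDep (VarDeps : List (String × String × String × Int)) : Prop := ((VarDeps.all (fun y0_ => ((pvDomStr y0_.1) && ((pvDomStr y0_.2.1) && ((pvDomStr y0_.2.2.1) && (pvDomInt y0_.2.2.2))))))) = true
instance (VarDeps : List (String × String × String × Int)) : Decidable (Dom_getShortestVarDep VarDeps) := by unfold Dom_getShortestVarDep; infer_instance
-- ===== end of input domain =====

-- B replaces A's single stateful loop (two running thresholds, two best-so-far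
-- accumulators) by sort-then-scan: stably sort the depth<100 deps by depth and
-- take the first (non-)report element of the sorted list: objective = alternative.

-- ===== PORT A =====
-- A's loop state is (minDepth, minDepthRep, minVarDep, minVarDepRep); the
-- enumerate index i and the dead variable minID are dropped.
def getShortestVarDep (VarDeps : List (String × String × String × Int)) : String × String × String × Int :=
  let s := VarDeps.foldl
    (fun (st : Int × Int × (String × String × String × Int) × (String × String × String × Int)) vardep =>
      let pathlength := vardep.2.2.2
      -- Python's '(v[2].find("report: ") >= 0 or v[2].find("document")) >= 0':
      -- if the first find is ≥ 0 the parenthesis is True and 'True >= 0' holds;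
      -- otherwise 'or' yields the second find, compared with 0.  Ported exactly.
      if (if PySem.Str.find vardep.2.2.1 "report: " ≥ 0 then true
          else decide (PySem.Str.find vardep.2.2.1 "document" ≥ 0)) then
        if pathlength < st.2.1 then (st.1, pathlength, st.2.2.1, vardep) else st
      else
        if pathlength < st.1 then (pathlength, st.2.1, vardep, st.2.2.2) else st)
    (100, 100, ("", "", "", 0), ("", "", "", 0))
  if s.2.2.2.1 ≠ "" then s.2.2.2 else s.2.2.1

-- ===== PORT B =====
def pvIsRep (v : String × String × String × Int) : Bool :=
  PySem.Str.isIn "report: " v.2.2.1 || PySem.Str.isIn "document" v.2.2.1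

def getShortestVarDep_alt (VarDeps : List (String × String × String × Int)) : String × String × String × Int :=
  let ordered := PySem.List.sorted (VarDeps.filter (fun v => decide (v.2.2.2 < 100)))
    (fun v => v.2.2.2) false
  match ordered.find? (fun v => pvIsRep v) with
  | some rep =>
      if rep.1 ≠ "" then rep
      else (ordered.find? (fun v => !pvIsRep v)).getD ("", "", "", 0)
  | none => (ordered.find? (fun v => !pvIsRep v)).getD ("", "", "", 0)

-- ===== PRECONDITION & SPEC =====
def Spec_getShortestVarDep (VarDeps : List (String × String × String × Int)) (out : String × String × String × Int) : Prop := out = getShortestVarDep_alt VarDeps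
instance (VarDeps : List (String × String × String × Int)) (out : String × String × String × Int) : Decidable (Spec_getShortestVarDep VarDeps out) := by unfold Spec_getShortestVarDep; infer_instance

-- ===== CLAIM (what is proved, stated in full; the proofs are below) =====
def Claim_equal_getShortestVarDep : Prop := ∀ (VarDeps : List (String × String × String × Int)), Dom_getShortestVarDep VarDeps → Spec_getShortestVarDep VarDeps (getShortestVarDep VarDeps)

-- ===== LEMMAS AND PROOFS =====

-- proof-side abbreviation for the element type and the sort key
def pvV : Type := String × String × String × Int
def pvKey (v : pvV) : Int := v.2.2.2
def pvBlt (a b : pvV) : Bool := decide (pvKey a < pvKey b)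

-- A's loop body, named for the proofs (definitionally the lambda in the port)
def pvStepA (st : Int × Int × pvV × pvV) (vardep : pvV) : Int × Int × pvV × pvV :=
  let pathlength := vardep.2.2.2
  if (if PySem.Str.find vardep.2.2.1 "report: " ≥ 0 then true
      else decide (PySem.Str.find vardep.2.2.1 "document" ≥ 0)) then
    if pathlength < st.2.1 then (st.1, pathlength, st.2.2.1, vardep) else st
  else
    if pathlength < st.1 then (pathlength, st.2.1, vardep, st.2.2.2) else st

-- single-group threshold fold and running minimum
def pvFoldM (dm : Int × pvV) (l : List pvV) : Int × pvV :=
  l.foldl (fun dm v => if v.2.2.2 < dm.1 then (v.2.2.2, v) else dm) dm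

def pvMinStep (m x : pvV) : pvV := if x.2.2.2 < m.2.2.2 then x else m

-- the step of PySem.List.min? (first extremal element kept)
def pvMinStepO (acc : Option pvV) (x : pvV) : Option pvV :=
  match acc with
  | none => some x
  | some m => if pvKey x < pvKey m then some x else some m

-- A's per-element test equals B's pvIsRep
theorem pvIsIn_eq_decide (sub s : String) :
    PySem.Str.isIn sub s = decide (PySem.Str.find s sub ≥ 0) := by
  by_cases h : PySem.Str.find s sub ≥ 0
  · rw [decide_eq_true h]
    exact (PySem.Str.isIn_iff_infix sub s).mpr ((PySem.Str.find_nonneg_iff s sub).mp h)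
  · rw [decide_eq_false h]
    by_contra hc
    have ht : PySem.Str.isIn sub s = true := by
      revert hc; cases PySem.Str.isIn sub s <;> simp
    exact h ((PySem.Str.find_nonneg_iff s sub).mpr ((PySem.Str.isIn_iff_infix sub s).mp ht))

theorem pvCond_eq (s : String) :
    (if PySem.Str.find s "report: " ≥ 0 then true
     else decide (PySem.Str.find s "document" ≥ 0)) =
    (PySem.Str.isIn "report: " s || PySem.Str.isIn "document" s) := by
  rw [pvIsIn_eq_decide, pvIsIn_eq_decide]
  by_cases h1 : PySem.Str.find s "report: " ≥ 0
  · simp only [h1, if_true, decide_true, Bool.true_or]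
  · simp only [h1, if_false, decide_false, Bool.false_or]

-- A's joint fold splits into two independent threshold folds over the partition
theorem pvSplit (l : List pvV) (st : Int × Int × pvV × pvV) :
    l.foldl pvStepA st =
      ((pvFoldM (st.1, st.2.2.1) (l.filter (fun v => !pvIsRep v))).1,
       (pvFoldM (st.2.1, st.2.2.2) (l.filter (fun v => pvIsRep v))).1,
       (pvFoldM (st.1, st.2.2.1) (l.filter (fun v => !pvIsRep v))).2,
       (pvFoldM (st.2.1, st.2.2.2) (l.filter (fun v => pvIsRep v))).2) := by
  induction l generalizing st with
  | nil => simp [pvFoldM]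
  | cons x t ih =>
    rw [List.foldl_cons]
    by_cases hr : pvIsRep x
    · have hc' : (if PySem.Str.find x.2.2.1 "report: " ≥ 0 then true
          else decide (PySem.Str.find x.2.2.1 "document" ≥ 0)) = true := by
        rw [pvCond_eq]; exact hr
      have hstep : pvStepA st x =
          if x.2.2.2 < st.2.1 then (st.1, x.2.2.2, st.2.2.1, x) else st := by
        simp only [pvStepA, hc', if_true]
      rw [hstep]
      by_cases hd : x.2.2.2 < st.2.1
      · rw [if_pos hd, ih]
        simp [hr, pvFoldM, List.foldl_cons, hd]
      · rw [if_neg hd, ih]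
        simp [hr, pvFoldM, List.foldl_cons, hd]
    · have hc' : (if PySem.Str.find x.2.2.1 "report: " ≥ 0 then true
          else decide (PySem.Str.find x.2.2.1 "document" ≥ 0)) = false := by
        rw [pvCond_eq]; exact Bool.eq_false_iff.mpr hr
      have hstep : pvStepA st x =
          if x.2.2.2 < st.1 then (x.2.2.2, st.2.1, x, st.2.2.2) else st := by
        simp only [pvStepA, hc', Bool.false_eq_true, if_false]
      rw [hstep]
      by_cases hd : x.2.2.2 < st.1
      · rw [if_pos hd, ih]
        simp [hr, pvFoldM, List.foldl_cons, hd]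
      · rw [if_neg hd, ih]
        simp [hr, pvFoldM, List.foldl_cons, hd]

-- once an element is installed, the threshold fold is the running minimum
theorem pvFoldM_run (t : List pvV) (m : pvV) :
    pvFoldM (m.2.2.2, m) t = ((t.foldl pvMinStep m).2.2.2, t.foldl pvMinStep m) := by
  induction t generalizing m with
  | nil => rfl
  | cons x t ih =>
    by_cases hd : x.2.2.2 < m.2.2.2 <;>
      simp [pvFoldM, List.foldl_cons, pvMinStep, hd] <;>
      simpa [pvFoldM] using ih _

-- elements with depth ≥ 100 never displace a minimum of depth < 100
theorem pvMin_filter (t : List pvV) (m : pvV) (hm : m.2.2.2 < 100) :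
    t.foldl pvMinStep m = (t.filter (fun v => v.2.2.2 < 100)).foldl pvMinStep m := by
  induction t generalizing m with
  | nil => rfl
  | cons x t ih =>
    by_cases hd : x.2.2.2 < 100
    · have : (pvMinStep m x).2.2.2 < 100 := by
        unfold pvMinStep; split <;> omega
      simp [List.foldl_cons, hd, ih _ this]
    · have : pvMinStep m x = m := by unfold pvMinStep; split <;> [omega; rfl]
      simp [List.foldl_cons, hd, this, ih _ hm]

-- min? on a cons is the running minimum seeded with the head
theorem pvMinq_cons (x : pvV) (t : List pvV) :
    PySem.List.min? (x :: t) (fun v : pvV => v.2.2.2) = some (t.foldl pvMinStep x) := by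
  induction t generalizing x with
  | nil => rfl
  | cons y t ih =>
    have step : PySem.List.min? (x :: y :: t) (fun v : pvV => v.2.2.2)
        = PySem.List.min? (pvMinStep x y :: t) (fun v : pvV => v.2.2.2) := by
      simp only [PySem.List.min?, List.foldl_cons]
      unfold pvMinStep
      by_cases hd : y.2.2.2 < x.2.2.2 <;> simp [hd]
    rw [step, ih, List.foldl_cons]

-- the threshold fold from 100 computes min? of the depth-filtered list
theorem pvFoldM_char (l : List pvV) (m0 : pvV) :
    pvFoldM (100, m0) l =
      match PySem.List.min? (l.filter (fun v => v.2.2.2 < 100)) (fun v => v.2.2.2) with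
      | none => (100, m0)
      | some v => (v.2.2.2, v) := by
  induction l with
  | nil => rfl
  | cons x t ih =>
    by_cases hd : x.2.2.2 < 100
    · have h1 : pvFoldM (100, m0) (x :: t) = pvFoldM (x.2.2.2, x) t := by
        simp [pvFoldM, List.foldl_cons, hd]
      rw [h1]
      have h2 := pvFoldM_run t x
      rw [pvMin_filter t x hd] at h2
      rw [h2]
      have h3 : (x :: t).filter (fun v => v.2.2.2 < 100) =
          x :: t.filter (fun v => v.2.2.2 < 100) := by
        rw [List.filter_cons]; simp [hd]
      rw [h3, pvMinq_cons]
    · have h1 : pvFoldM (100, m0) (x :: t) = pvFoldM (100, m0) t := by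
        simp [pvFoldM, List.foldl_cons, hd]
      rw [h1, ih]
      rw [List.filter_cons]
      simp [hd]

-- inserting x into a key-sorted list: the first p-element of the result is the
-- min?-step of the old first p-element with x (stability: ties keep the old one)
theorem pvInsert_find (p : pvV → Bool) (x : pvV) (ys : List pvV)
    (hs : ys.Pairwise (fun a b => pvKey a ≤ pvKey b)) :
    (PySem.List.insertBy pvBlt x ys).find? p =
      if p x then pvMinStepO (ys.find? p) x else ys.find? p := by
  induction ys with
  | nil =>
    by_cases hp : p x <;> simp [PySem.List.insertBy, List.find?, hp, pvMinStepO]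
  | cons y ys ih =>
    rcases List.pairwise_cons.mp hs with ⟨hy, hs'⟩
    by_cases hlt : pvBlt x y
    · have hxy : pvKey x < pvKey y := of_decide_eq_true hlt
      have hins : PySem.List.insertBy pvBlt x (y :: ys) = x :: y :: ys := by
        simp [PySem.List.insertBy, hlt]
      rw [hins]
      by_cases hp : p x
      · rw [List.find?_cons_of_pos hp, if_pos hp]
        cases hfind : (y :: ys).find? p with
        | none => rfl
        | some m =>
          have hm : m ∈ y :: ys := List.mem_of_find?_eq_some hfind
          have hym : pvKey y ≤ pvKey m := by
            rcases List.mem_cons.mp hm with h | h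
            · simp [h]
            · exact hy m h
          have hxm : pvKey x < pvKey m := lt_of_lt_of_le hxy hym
          simp [pvMinStepO, hxm]
      · rw [List.find?_cons_of_neg hp, if_neg hp]
    · have hxy : ¬ pvKey x < pvKey y := by
        simpa [pvBlt] using hlt
      have hins : PySem.List.insertBy pvBlt x (y :: ys) =
          y :: PySem.List.insertBy pvBlt x ys := by
        simp [PySem.List.insertBy, hlt]
      rw [hins]
      by_cases hpy : p y
      · rw [List.find?_cons_of_pos hpy, List.find?_cons_of_pos hpy]
        by_cases hp : p x
        · rw [if_pos hp]
          simp [pvMinStepO, hxy]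
        · rw [if_neg hp]
      · rw [List.find?_cons_of_neg hpy, List.find?_cons_of_neg hpy, ih hs']

-- the sorted list's Pairwise order, phrased for the foldl-insertBy normal form
theorem pvSorted_foldl_pairwise (l : List pvV) :
    (l.foldl (fun acc x => PySem.List.insertBy pvBlt x acc) []).Pairwise
      (fun a b => pvKey a ≤ pvKey b) := by
  have h := PySem.List.sorted_pairwise l pvKey
  rwa [PySem.List.sorted_eq_foldl_insertBy] at h

-- first p-element of the stable sort = first minimal p-element of the list
theorem pvMinq_append (ys : List pvV) (x : pvV) :
    PySem.List.min? (ys ++ [x]) (fun v : pvV => v.2.2.2) =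
      pvMinStepO (PySem.List.min? ys (fun v : pvV => v.2.2.2)) x := by
  cases ys with
  | nil => simp [PySem.List.min?, pvMinStepO]
  | cons y t =>
    rw [List.cons_append, pvMinq_cons, pvMinq_cons, List.foldl_append,
        List.foldl_cons, List.foldl_nil]
    simp only [pvMinStepO, pvMinStep, pvKey]
    split <;> rfl

-- first p-element of the stable sort = first minimal p-element of the list
theorem pvSorted_find (p : pvV → Bool) (l : List pvV) :
    (PySem.List.sorted l (fun v : pvV => v.2.2.2) false).find? p =
      PySem.List.min? (l.filter p) (fun v : pvV => v.2.2.2) := by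
  rw [PySem.List.sorted_eq_foldl_insertBy]
  show (l.foldl (fun acc x => PySem.List.insertBy pvBlt x acc) []).find? p = _
  induction l using List.reverseRecOn with
  | nil => rfl
  | append_singleton l x ih =>
    rw [List.foldl_append, List.foldl_cons, List.foldl_nil]
    rw [pvInsert_find p x _ (pvSorted_foldl_pairwise l)]
    rw [ih]
    rw [List.filter_append]
    by_cases hp : p x
    · have hfx : List.filter p [x] = [x] := by simp [hp]
      rw [if_pos hp, hfx, pvMinq_append]
    · have hfx : List.filter p [x] = [] := by simp [hp]
      rw [if_neg hp, hfx, List.append_nil]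

-- final selection, abstracted over the two optional minima
theorem pvFinal (oR oG : Option pvV) :
    (if (match oR with
         | none => ((100 : Int), (("", "", "", (0 : Int)) : pvV))
         | some v => (v.2.2.2, v)).2.1 ≠ "" then
       (match oR with
        | none => ((100 : Int), (("", "", "", (0 : Int)) : pvV))
        | some v => (v.2.2.2, v)).2
     else
       (match oG with
        | none => ((100 : Int), (("", "", "", (0 : Int)) : pvV))
        | some v => (v.2.2.2, v)).2)
    = (match oR with
       | some r => if r.1 ≠ "" then r else oG.getD ("", "", "", 0)
       | none => oG.getD ("", "", "", 0)) := by
  cases oR <;> cases oG <;> simp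

-- ===== VERDICT (by name: the statement is the Claim_ definition above) =====
theorem getShortestVarDep_spec : Claim_equal_getShortestVarDep := by
  unfold Claim_equal_getShortestVarDep
  intro l _
  unfold Spec_getShortestVarDep
  have hcomm : ∀ (p : pvV → Bool),
      (l.filter p).filter (fun v => v.2.2.2 < 100) =
        (l.filter (fun v => v.2.2.2 < 100)).filter p := by
    intro p
    exact List.filter_comm _ _ _
  have key : ∀ (p : pvV → Bool), pvFoldM (100, ("", "", "", 0)) (l.filter p) =
      match PySem.List.min? ((l.filter (fun v => v.2.2.2 < 100)).filter p)
          (fun v => v.2.2.2) with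
      | none => (100, ("", "", "", 0))
      | some v => (v.2.2.2, v) := by
    intro p
    rw [pvFoldM_char, hcomm]
  have hA : getShortestVarDep l =
      (if ((l.foldl pvStepA (100, 100, ("", "", "", 0), ("", "", "", 0))).2.2.2).1 ≠ "" then
         (l.foldl pvStepA (100, 100, ("", "", "", 0), ("", "", "", 0))).2.2.2
       else (l.foldl pvStepA (100, 100, ("", "", "", 0), ("", "", "", 0))).2.2.1) := rfl
  have hsplit : l.foldl pvStepA (100, 100, ("", "", "", 0), ("", "", "", 0)) =
      ((pvFoldM (100, ("", "", "", 0)) (l.filter (fun v => !pvIsRep v))).1,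
       (pvFoldM (100, ("", "", "", 0)) (l.filter (fun v => pvIsRep v))).1,
       (pvFoldM (100, ("", "", "", 0)) (l.filter (fun v => !pvIsRep v))).2,
       (pvFoldM (100, ("", "", "", 0)) (l.filter (fun v => pvIsRep v))).2) :=
    pvSplit l _
  rw [hA, hsplit]
  show (if ((pvFoldM (100, ("", "", "", 0)) (l.filter (fun v => pvIsRep v))).2).1 ≠ "" then
          (pvFoldM (100, ("", "", "", 0)) (l.filter (fun v => pvIsRep v))).2
        else (pvFoldM (100, ("", "", "", 0)) (l.filter (fun v => !pvIsRep v))).2) = _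
  rw [key, key]
  show _ = (match (PySem.List.sorted (l.filter (fun v : pvV => decide (v.2.2.2 < 100)))
        (fun v : pvV => v.2.2.2) false).find? (fun v : pvV => pvIsRep v) with
    | some rep =>
        if rep.1 ≠ "" then rep
        else ((PySem.List.sorted (l.filter (fun v : pvV => decide (v.2.2.2 < 100)))
            (fun v : pvV => v.2.2.2) false).find? (fun v : pvV => !pvIsRep v)).getD ("", "", "", 0)
    | none => ((PySem.List.sorted (l.filter (fun v : pvV => decide (v.2.2.2 < 100)))
        (fun v : pvV => v.2.2.2) false).find? (fun v : pvV => !pvIsRep v)).getD ("", "", "", 0))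
  rw [pvSorted_find, pvSorted_find]
  exact pvFinal _ _
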